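-- pv_equiv track=rewrite | github.com/quadcode-tech/quadcodescript-docs | source/qcs/qcs.py | build_lines_list
-- ===== SOURCE A (Python) =====
-- def build_lines_list(content):
--     currentLine = ""
--     linesList = []
--
--     for contentLine in content:
--         if len(contentLine) == 0:
--             if len(currentLine) > 0:
--                 linesList.append(currentLine)
--             currentLine = ""
--         elif len(currentLine) > 0 and contentLine.startswith(':'):
--             linesList.append(currentLine)
--             currentLine = contentLine
--         else:
--             if len(currentLine) > 0:
--                 currentLine = currentLine + " " + contentLine
--             else:
--                 currentLine = contentLine
--
--     if len(currentLine) > 0: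
--         linesList.append(currentLine)
--
--     return linesList
-- ===== SOURCE B (Python) =====
-- def _paragraphs(content):
--     """Maximal runs of non-empty lines, in order (two-pointer scan)."""
--     paras = []
--     i, n = 0, len(content)
--     while i < n:
--         if len(content[i]) == 0:
--             i += 1
--         else:
--             j = i
--             while j < n and len(content[j]) > 0:
--                 j += 1
--             paras.append(content[i:j])
--             i = j
--     return paras
--
-- def _segments(para):
--     """Split a paragraph before every ':'-line except a leading one."""
--     segs = []
--     i, n = 0, len(para)
--     while i < n:
--         j = i + 1
--         while j < n and not para[j].startswith(':'):
--             j += 1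
--         segs.append(para[i:j])
--         i = j
--     return segs
--
-- def build_lines_list(content):
--     return [" ".join(seg) for para in _paragraphs(content) for seg in _segments(para)]
-- ===== Notes on version B (the rewrite author's own statement) =====
-- stated objective: faster
-- what changed: B replaces A's single pass with a grow-a-string accumulator by three staged passes: a two-pointer scan cutting the input into paragraphs (maximal runs of non-empty lines), a second scan cutting each paragraph before non-leading ':' lines, and a final pass joining each segment once with ' '; this removes the repeated string concatenation, which is quadratic in the length of a logical line.
import Mathlib
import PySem

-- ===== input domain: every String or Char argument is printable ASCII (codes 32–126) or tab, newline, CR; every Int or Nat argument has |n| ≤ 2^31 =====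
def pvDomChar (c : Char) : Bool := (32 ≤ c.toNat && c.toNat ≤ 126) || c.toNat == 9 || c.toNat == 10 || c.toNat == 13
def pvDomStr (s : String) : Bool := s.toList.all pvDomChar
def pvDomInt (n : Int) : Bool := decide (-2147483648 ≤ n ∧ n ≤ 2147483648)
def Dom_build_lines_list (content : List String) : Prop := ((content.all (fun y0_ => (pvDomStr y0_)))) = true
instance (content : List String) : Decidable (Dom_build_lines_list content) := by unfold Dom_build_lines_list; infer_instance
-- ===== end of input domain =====

-- B replaces A's one-pass string accumulator by staged run-splitting (paragraphs, then
-- segments before non-leading ':' lines) with one join per segment instead of repeated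
-- concatenation (objective: faster; measured).
-- Strings are handled as List Char (PySem.Chars); Python str '+' is exact list append.

-- ===== PORT A =====
-- A's loop state: (currentLine, linesList), both on the List Char side.
def pvAStep (st : List Char × List (List Char)) (contentLine : List Char) :
    List Char × List (List Char) :=
  let (currentLine, linesList) := st
  if contentLine.length == 0 then
    (if currentLine.length > 0 then ([], linesList ++ [currentLine]) else ([], linesList))
  else if currentLine.length > 0 && PySem.Chars.startswith contentLine [':'] then
    (contentLine, linesList ++ [currentLine])
  else
    (if currentLine.length > 0 then (currentLine ++ ' ' :: contentLine, linesList)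
     else (contentLine, linesList))

def build_lines_list (content : List String) : List String :=
  let r := (content.map String.toList).foldl pvAStep ([], [])
  (if r.1.length > 0 then r.2 ++ [r.1] else r.2).map String.ofList

-- ===== PORT B =====
-- predicates of B's two inner scans: non-empty line, non-':' line
def pvNE (s : List Char) : Bool := !s.isEmpty
def pvNC (s : List Char) : Bool := !(PySem.Chars.startswith s [':'])

-- _paragraphs: each outer-loop iteration skips one empty line or cuts one maximal
-- run of non-empty lines (the inner two-pointer scan = takeWhile/dropWhile).
def pvParas : List (List Char) → List (List (List Char))
  | [] => []
  | l :: t =>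
    if l.isEmpty then pvParas t
    else (l :: t.takeWhile pvNE) :: pvParas (t.dropWhile pvNE)
termination_by xs => xs.length
decreasing_by
  · simp
  · exact Nat.lt_succ_of_le (List.length_dropWhile_le _ _)

-- _segments: each iteration cuts one segment reaching up to the next ':' line.
def pvSegs : List (List Char) → List (List (List Char))
  | [] => []
  | h :: t => (h :: t.takeWhile pvNC) :: pvSegs (t.dropWhile pvNC)
termination_by xs => xs.length
decreasing_by
  exact Nat.lt_succ_of_le (List.length_dropWhile_le _ _)

def build_lines_list_alt (content : List String) : List String :=
  ((pvParas (content.map String.toList)).flatMap pvSegs).map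
    (fun g => String.ofList (PySem.Chars.join [' '] g))

-- ===== PRECONDITION & SPEC =====
def Spec_build_lines_list (content : List String) (out : List String) : Prop := out = build_lines_list_alt content
instance (content : List String) (out : List String) : Decidable (Spec_build_lines_list content out) := by unfold Spec_build_lines_list; infer_instance

-- ===== CLAIM (what is proved, stated in full; the proofs are below) =====
def Claim_equal_build_lines_list : Prop := ∀ (content : List String), Dom_build_lines_list content → Spec_build_lines_list content (build_lines_list content)

-- ===== LEMMAS AND PROOFS =====

-- B's result on the List Char side
def pvS (c : List (List Char)) : List (List Char) :=
  ((pvParas c).flatMap pvSegs).map (PySem.Chars.join [' '])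

-- the combined continuation predicate of A's accumulation
def pvPC (s : List Char) : Bool := pvNE s && pvNC s

-- A's post-loop flush
def pvFin (st : List Char × List (List Char)) : List (List Char) :=
  if st.1.length > 0 then st.2 ++ [st.1] else st.2

theorem pvS_nil : pvS [] = [] := by simp [pvS, pvParas]

theorem pvS_cons_empty (t : List (List Char)) : pvS ([] :: t) = pvS t := by
  simp [pvS, pvParas]

theorem pv_takeWhile_comp (t : List (List Char)) :
    (t.takeWhile pvNE).takeWhile pvNC = t.takeWhile pvPC := by
  induction t with
  | nil => rfl
  | cons a t ih =>
    by_cases h1 : pvNE a = true <;> by_cases h2 : pvNC a = true <;>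
      simp [List.takeWhile, h1, h2, pvPC, ih]

theorem pv_dropWhile_comp (t : List (List Char)) :
    t.dropWhile pvPC = (t.takeWhile pvNE).dropWhile pvNC ++ t.dropWhile pvNE := by
  induction t with
  | nil => rfl
  | cons a t ih =>
    by_cases h1 : pvNE a = true
    · by_cases h2 : pvNC a = true
      · simp [List.takeWhile, List.dropWhile, h1, h2, pvPC, ih]
      · simp [List.takeWhile, List.dropWhile, h1, h2, pvPC]
    · simp [List.dropWhile, h1, pvPC]

theorem pv_takeWhile_append_of (u v : List (List Char)) (hu : ∀ x ∈ u, pvNE x = true)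
    (hv : v.takeWhile pvNE = []) : (u ++ v).takeWhile pvNE = u := by
  induction u with
  | nil => simpa using hv
  | cons a u ih =>
    have ha : pvNE a = true := hu a (by simp)
    simp only [List.cons_append, List.takeWhile, ha]
    simp [ih (fun x hx => hu x (by simp [hx]))]

theorem pv_dropWhile_append_of (u v : List (List Char)) (hu : ∀ x ∈ u, pvNE x = true)
    (hv : v.dropWhile pvNE = v) : (u ++ v).dropWhile pvNE = v := by
  induction u with
  | nil => simpa using hv
  | cons a u ih =>
    have ha : pvNE a = true := hu a (by simp)
    simp only [List.cons_append, List.dropWhile, ha]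
    simpa using ih (fun x hx => hu x (by simp [hx]))

-- v is [] or starts with an empty line in both uses
theorem pvS_split (u v : List (List Char)) (hu : ∀ x ∈ u, pvNE x = true)
    (hv : v.takeWhile pvNE = [] ∧ v.dropWhile pvNE = v) :
    pvS (u ++ v) = (pvSegs u).map (PySem.Chars.join [' ']) ++ pvS v := by
  cases u with
  | nil => simp [pvSegs]
  | cons h t =>
    have hh : pvNE h = true := hu h (by simp)
    have hhe : h.isEmpty = false := by simpa [pvNE] using hh
    have ht : ∀ x ∈ t, pvNE x = true := fun x hx => hu x (by simp [hx])
    simp only [pvS, List.cons_append, pvParas, hhe, Bool.false_eq_true, if_false,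
      pv_takeWhile_append_of t v ht hv.1, pv_dropWhile_append_of t v ht hv.2]
    simp

theorem pvS_cons_ne (l : List Char) (t : List (List Char)) (hl : l.isEmpty = false) :
    pvS (l :: t) = PySem.Chars.join [' '] (l :: t.takeWhile pvPC) :: pvS (t.dropWhile pvPC) := by
  have hmem : ∀ x ∈ t.takeWhile pvNE, pvNE x = true := fun x hx => List.mem_takeWhile_imp hx
  have hdmem : ∀ x ∈ (t.takeWhile pvNE).dropWhile pvNC, pvNE x = true := by
    intro x hx
    exact hmem x ((List.dropWhile_sublist _).mem hx)
  have hv1 : (t.dropWhile pvNE).takeWhile pvNE = [] := by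
    cases h : t.dropWhile pvNE with
    | nil => rfl
    | cons a r =>
      have : pvNE a = false := by
        have := List.head?_dropWhile_not pvNE t
        rw [h] at this; simpa using this
      simp [List.takeWhile, this]
  have hv2 : (t.dropWhile pvNE).dropWhile pvNE = t.dropWhile pvNE := by
    cases h : t.dropWhile pvNE with
    | nil => rfl
    | cons a r =>
      have : pvNE a = false := by
        have := List.head?_dropWhile_not pvNE t
        rw [h] at this; simpa using this
      simp [List.dropWhile, this]
  calc pvS (l :: t)
      = ((pvSegs (l :: t.takeWhile pvNE)).map (PySem.Chars.join [' ']))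
          ++ pvS (t.dropWhile pvNE) := by
        simp [pvS, pvParas, hl]
    _ = PySem.Chars.join [' '] (l :: t.takeWhile pvPC) :: pvS (t.dropWhile pvPC) := by
        rw [pvSegs, pv_takeWhile_comp, pv_dropWhile_comp]
        rw [pvS_split _ _ hdmem ⟨hv1, hv2⟩]
        simp

theorem pv_join_unglue (a b : List Char) (xs : List (List Char)) :
    PySem.Chars.join [' '] ((a ++ ' ' :: b) :: xs) = PySem.Chars.join [' '] (a :: b :: xs) := by
  cases xs with
  | nil => simp [PySem.Chars.join_singleton, PySem.Chars.join_cons_cons]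
  | cons c r => simp [PySem.Chars.join_cons_cons]

-- the main simultaneous invariant: A's fold from empty / non-empty currentLine
theorem pv_main (content : List (List Char)) :
    (∀ acc, pvFin (content.foldl pvAStep ([], acc)) = acc ++ pvS content) ∧
    (∀ cur acc, cur ≠ [] →
      pvFin (content.foldl pvAStep (cur, acc)) =
        acc ++ PySem.Chars.join [' '] (cur :: content.takeWhile pvPC)
            :: pvS (content.dropWhile pvPC)) := by
  induction content with
  | nil =>
    refine ⟨fun acc => by simp [pvFin, pvS_nil], fun cur acc hc => ?_⟩
    simp [pvFin, List.length_pos_iff.mpr hc, pvS_nil, PySem.Chars.join_singleton]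
  | cons l t ih =>
    obtain ⟨ihM, ihC⟩ := ih
    by_cases hl : l = []
    · subst hl
      refine ⟨fun acc => ?_, fun cur acc hc => ?_⟩
      · simp only [List.foldl_cons, pvAStep]
        simpa [pvS_cons_empty] using ihM acc
      · have hstep : pvAStep (cur, acc) [] = ([], acc ++ [cur]) := by
          simp [pvAStep, List.length_pos_iff.mpr hc]
        simp only [List.foldl_cons, hstep, ihM (acc ++ [cur])]
        have hpc : pvPC ([] : List Char) = false := by simp [pvPC, pvNE]
        simp [List.takeWhile, List.dropWhile, hpc, pvS_cons_empty,
          PySem.Chars.join_singleton]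
    · have hlen : l.length ≠ 0 := fun h => hl (List.length_eq_zero_iff.mp h)
      have hle : l.isEmpty = false := by simpa [List.isEmpty_iff] using hl
      refine ⟨fun acc => ?_, fun cur acc hc => ?_⟩
      · have hstep : pvAStep ([], acc) l = (l, acc) := by
          simp [pvAStep, hlen]
        simp only [List.foldl_cons, hstep, ihC l acc hl]
        rw [pvS_cons_ne l t hle]
      · by_cases hst : PySem.Chars.startswith l [':'] = true
        · have hstep : pvAStep (cur, acc) l = (l, acc ++ [cur]) := by
            simp [pvAStep, hlen, hst, List.length_pos_iff.mpr hc]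
          have hpc : pvPC l = false := by simp [pvPC, pvNC, hst]
          simp only [List.foldl_cons, hstep, ihC l (acc ++ [cur]) hl]
          simp [List.takeWhile, List.dropWhile, hpc, pvS_cons_ne l t hle,
            PySem.Chars.join_singleton]
        · have hstep : pvAStep (cur, acc) l = (cur ++ ' ' :: l, acc) := by
            simp [pvAStep, hlen, hst, List.length_pos_iff.mpr hc]
          have hpc : pvPC l = true := by simp [pvPC, pvNE, pvNC, hle, hst]
          simp only [List.foldl_cons, hstep,
            ihC (cur ++ ' ' :: l) acc (by simp), List.takeWhile, List.dropWhile, hpc,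
            pv_join_unglue]

-- ===== VERDICT (by name: the statement is the Claim_ definition above) =====
theorem build_lines_list_spec : Claim_equal_build_lines_list := by
  intro content _
  unfold Spec_build_lines_list build_lines_list build_lines_list_alt
  have h := (pv_main (content.map String.toList)).1 []
  simp only [pvFin] at h
  simp [h, pvS, List.map_map, Function.comp_def]
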